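-- pv_equiv track=rewrite | github.com/HEPHZIBAI/160-Days-of-Daily-Problem-Solving | 16.greedy/greedy bonus/Largest number in one swap.py | largestSwap
-- ===== SOURCE A (Python) =====
-- def largestSwap(s):
--     s=list(s)
--     l={digit:i for i,digit in enumerate(s)}
--
--     for i in range(len(s)):
--         for d in map(str,range(9,int(s[i]),-1)):
--             if d in l and l[d]>i:
--                 s[i],s[l[d]]=s[l[d]],s[i]
--                 return ''.join(s)
--
--     return ''.join(s)
-- ===== SOURCE B (Python) =====
-- def largestSwap(s):
--     n = len(s)
--     chars = list(s)
--     # maxAfter[i]: index of the rightmost occurrence of the largest digit among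
--     # positions i+1..n-1 (None when there is no digit there), built right-to-left
--     maxAfter = [None] * n
--     best = None
--     for i in range(n - 1, -1, -1):
--         maxAfter[i] = best
--         if chars[i].isdigit() and (best is None or chars[i] > chars[best]):
--             best = i
--     for i in range(n):
--         v = int(chars[i])            # non-numeric input fails here, as it should
--         j = maxAfter[i]
--         if j is not None and int(chars[j]) > v:
--             chars[i], chars[j] = chars[j], chars[i]
--             break
--     return ''.join(chars)
-- ===== Notes on version B (the rewrite author's own statement) =====
-- stated objective: alternative
-- what changed: Replaces A's last-index-per-digit dictionary plus a per-position descending probe over digits 9..int(s[i])+1 with a precomputed suffix-maximum-digit index table (one right-to-left pass, rightmost index kept on ties) followed by a single left-to-right scan that swaps at the first improvable position.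
import Mathlib
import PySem

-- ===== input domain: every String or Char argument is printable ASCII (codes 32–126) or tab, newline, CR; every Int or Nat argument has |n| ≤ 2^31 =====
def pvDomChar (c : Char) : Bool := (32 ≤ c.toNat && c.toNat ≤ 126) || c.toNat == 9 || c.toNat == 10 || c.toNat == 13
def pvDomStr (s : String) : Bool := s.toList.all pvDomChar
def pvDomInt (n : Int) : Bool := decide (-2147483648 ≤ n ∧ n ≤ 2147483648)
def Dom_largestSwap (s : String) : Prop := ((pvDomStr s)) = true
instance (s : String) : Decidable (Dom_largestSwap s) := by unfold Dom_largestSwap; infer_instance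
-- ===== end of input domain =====

-- B replaces A's last-index-per-digit dictionary and per-position descending digit probe by a
-- right-to-left suffix-maximum-digit index table followed by one left-to-right scan (objective: alternative).

-- ===== PORT A =====
-- inner loop 'for d in map(str, range(9, int(s[i]), -1)): if d in l and l[d] > i: …'
-- (returns the digit character found, or none when the loop falls through)
def lsInnerA (l : PySem.Dict Char Int) (i : Int) : List Int → Option Char
  | [] => none
  | d :: ds =>
      let dc := Char.ofNat (d.toNat + 48)      -- str(d) for d ∈ 1..9, exact on that range
      if l.contains dc ∧ l.getD dc 0 > i then some dc
      else lsInnerA l i ds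

set_option maxHeartbeats 1000000 in
-- outer loop 'for i in range(len(s)):' with the early return on a swap
def lsLoopA (chars : List Char) (l : PySem.Dict Char Int) (i : Nat) : String :=
  if _h : i < chars.length then
    let v := (PySem.Int.ofStr? (String.ofList [chars.getD i ' '])).getD 0   -- int(s[i]); ValueError (none) is outside Pre_
    match lsInnerA l i (PySem.List.pyRange 9 v (-1)) with
    | some dc =>
        let j := (l.getD dc 0).toNat
        String.ofList ((chars.set i (chars.getD j ' ')).set j (chars.getD i ' '))
    | none => lsLoopA chars l (i + 1)
  else String.ofList chars
termination_by chars.length - i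
decreasing_by omega

def largestSwap (s : String) : String :=
  let chars := s.toList
  let l := (PySem.List.enumerate chars 0).foldl (fun d p => d.insert p.2 p.1) PySem.Dict.empty
  lsLoopA chars l 0

-- ===== PORT B =====
-- right-to-left pass of Source B over i = n-1 .. 0 (first argument counts the remaining iterations):
-- 'maxAfter[i] = best; if chars[i].isdigit() and (best is None or chars[i] > chars[best]): best = i'
def lsBuildB (chars : List Char) : Nat → Option Nat → List (Option Nat) → List (Option Nat)
  | 0, _best, acc => acc
  | i + 1, best, acc =>
      lsBuildB chars i
        (if (chars.getD i ' ').isDigit &&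
            (match best with
             | none => true
             | some b => decide (chars.getD i ' ' > chars.getD b ' '))
         then some i else best)
        (best :: acc)

-- left-to-right pass of Source B: 'v = int(chars[i]); j = maxAfter[i]; if j is not None and int(chars[j]) > v: …'
-- (int(chars[i]) is ValueError on a non-digit: outside Pre_; with j not None, chars[j] is always a digit)
def lsScanB (chars : List Char) : List (Option Nat) → Nat → String
  | [], _ => String.ofList chars
  | some j :: rest, i =>
      if (PySem.Int.ofStr? (String.ofList [chars.getD j ' '])).getD 0 >
          (PySem.Int.ofStr? (String.ofList [chars.getD i ' '])).getD 0 then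
        String.ofList ((chars.set i (chars.getD j ' ')).set j (chars.getD i ' '))
      else lsScanB chars rest (i + 1)
  | none :: rest, i => lsScanB chars rest (i + 1)

def largestSwap_alt (s : String) : String :=
  let chars := s.toList
  lsScanB chars (lsBuildB chars chars.length none []) 0

-- ===== PRECONDITION & SPEC =====
-- Pre_ holds exactly where A returns: either the string is all digits, or a swap fires while A is
-- still inside the leading digit prefix; on every other string A raises ValueError at the first
-- non-digit it reaches.
def Pre_largestSwap (s : String) : Prop :=
  (∀ k : Nat, k < s.toList.length → (s.toList.getD k ' ').isDigit = true) ∨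
  (∃ i : Nat, i < s.toList.length ∧ ∃ j : Nat, j < s.toList.length ∧
    (∀ k : Nat, k ≤ i → (s.toList.getD k ' ').isDigit = true) ∧ i < j ∧
    (s.toList.getD j ' ').isDigit = true ∧ s.toList.getD i ' ' < s.toList.getD j ' ')
instance (s : String) : Decidable (Pre_largestSwap s) := by unfold Pre_largestSwap; infer_instance
def pvWitness_largestSwap : String := "1993"

def Spec_largestSwap (s : String) (out : String) : Prop := out = largestSwap_alt s
instance (s : String) (out : String) : Decidable (Spec_largestSwap s out) := by unfold Spec_largestSwap; infer_instance

-- ===== CLAIM (what is proved, stated in full; the proofs are below) =====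
def Claim_equal_largestSwap : Prop := ∀ (s : String), Dom_largestSwap s → Pre_largestSwap s → Spec_largestSwap s (largestSwap s)

-- ===== LEMMAS AND PROOFS =====

-- last index (from offset s) of character c, mirroring the last-wins dict comprehension
def lastIdxFrom : List Char → Int → Char → Option Int
  | [], _, _ => none
  | x :: xs, s, c => (lastIdxFrom xs (s + 1) c).or (if x = c then some s else none)

theorem dict_get?_eq (chars : List Char) : ∀ (s : Int) (d : PySem.Dict Char Int) (c : Char),
    (((PySem.List.enumerate chars s).foldl (fun d p => d.insert p.2 p.1) d).get? c)
      = (lastIdxFrom chars s c).or (d.get? c) := by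
  induction chars with
  | nil => intro s d c; simp [PySem.List.enumerate_nil, lastIdxFrom]
  | cons x xs ih =>
      intro s d c
      rw [PySem.List.enumerate_cons]
      simp only [List.foldl_cons, lastIdxFrom]
      rw [ih, Option.or_assoc]
      cases hx : lastIdxFrom xs (s + 1) c with
      | some j => simp
      | none =>
          simp only [Option.none_or]
          rw [PySem.Dict.get?_insert]
          by_cases hc : c = x
          · subst hc; simp
          · rw [if_neg (fun h : x = c => hc h.symm), Option.none_or, if_neg hc]

theorem lif_none (chars : List Char) : ∀ (s : Int) (c : Char),
    lastIdxFrom chars s c = none →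
    ∀ k : Nat, k < chars.length → chars.getD k ' ' ≠ c := by
  induction chars with
  | nil => intro s c _ k hk; simp at hk
  | cons x xs ih =>
      intro s c h k hk
      simp only [lastIdxFrom, Option.or_eq_none_iff] at h
      obtain ⟨h1, h2⟩ := h
      by_cases hxc : x = c
      · simp [hxc] at h2
      · cases k with
        | zero => simpa using hxc
        | succ k'' =>
            simp only [List.length_cons] at hk
            simpa using ih (s + 1) c h1 k'' (by omega)

theorem lif_some (chars : List Char) : ∀ (s j : Int) (c : Char),
    lastIdxFrom chars s c = some j →
    ∃ k : Nat, j = s + k ∧ k < chars.length ∧ chars.getD k ' ' = c ∧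
      ∀ k' : Nat, k < k' → k' < chars.length → chars.getD k' ' ' ≠ c := by
  induction chars with
  | nil => intro s j c h; simp [lastIdxFrom] at h
  | cons x xs ih =>
      intro s j c h
      simp only [lastIdxFrom] at h
      cases hx : lastIdxFrom xs (s + 1) c with
      | some j' =>
          rw [hx] at h
          simp only [Option.some_or, Option.some.injEq] at h
          subst h
          obtain ⟨k, hk1, hk2, hk3, hk4⟩ := ih (s + 1) j' c hx
          refine ⟨k + 1, by push_cast; omega, by simp; omega, by simpa using hk3, ?_⟩
          intro k' h1 h2
          cases k' with
          | zero => omega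
          | succ k'' =>
              simp only [List.length_cons] at h2
              simpa using hk4 k'' (by omega) (by omega)
      | none =>
          rw [hx] at h
          simp only [Option.none_or] at h
          by_cases hxc : x = c
          · rw [if_pos hxc] at h
            injection h with h
            subst h
            refine ⟨0, by simp, by simp, by simpa using hxc, ?_⟩
            intro k' h1 h2
            cases k' with
            | zero => omega
            | succ k'' =>
                simp only [List.length_cons] at h2
                simpa using lif_none xs (s + 1) c hx k'' (by omega)
          · simp [hxc] at h

theorem char_lt_iff (c d : Char) : c < d ↔ c.toNat < d.toNat := by
  rw [Char.lt_def, ← Char.toNat_val, ← Char.toNat_val]; exact UInt32.lt_iff_toNat_lt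

theorem char_le_iff (c d : Char) : c ≤ d ↔ c.toNat ≤ d.toNat := by
  rw [Char.le_def, ← Char.toNat_val, ← Char.toNat_val]; exact UInt32.le_iff_toNat_le

theorem digit_toNat (c : Char) (h : c.isDigit = true) : 48 ≤ c.toNat ∧ c.toNat ≤ 57 := by
  rw [Char.isDigit, Bool.and_eq_true, decide_eq_true_iff, decide_eq_true_iff] at h
  exact ⟨UInt32.le_iff_toNat_le.mp h.1, UInt32.le_iff_toNat_le.mp h.2⟩

theorem digit_cases (c : Char) (h : c.isDigit = true) :
    c = '0' ∨ c = '1' ∨ c = '2' ∨ c = '3' ∨ c = '4' ∨ c = '5' ∨ c = '6' ∨ c = '7' ∨ c = '8' ∨ c = '9' := by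
  obtain ⟨h1, h2⟩ := digit_toNat c h
  have hv : c.toNat = 48 ∨ c.toNat = 49 ∨ c.toNat = 50 ∨ c.toNat = 51 ∨ c.toNat = 52 ∨
      c.toNat = 53 ∨ c.toNat = 54 ∨ c.toNat = 55 ∨ c.toNat = 56 ∨ c.toNat = 57 := by omega
  have hc := (Char.ofNat_toNat c).symm
  rcases hv with h | h | h | h | h | h | h | h | h | h <;>
    rw [h] at hc <;> simp [hc]

theorem digit_ofStr (c : Char) (h : c.isDigit = true) :
    PySem.Int.ofStr? (String.ofList [c]) = some ((c.toNat : Int) - 48) := by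
  rcases digit_cases c h with h | h | h | h | h | h | h | h | h | h <;> subst h <;> decide

theorem dchar_toNat (n : Nat) (h : n ≤ 9) : (Char.ofNat (n + 48)).toNat = n + 48 := by
  interval_cases n <;> decide

theorem dchar_isDigit (n : Nat) (h : n ≤ 9) : (Char.ofNat (n + 48)).isDigit = true := by
  interval_cases n <;> decide

-- index of the rightmost occurrence of the largest digit among positions ≥ i (none: no digit there)
def bestDig (chars : List Char) (i : Nat) : Option Nat :=
  if _h : i < chars.length then
    if (chars.getD i ' ').isDigit &&
        (match bestDig chars (i + 1) with
         | none => true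
         | some k => decide (chars.getD i ' ' > chars.getD k ' '))
    then some i else bestDig chars (i + 1)
  else none
termination_by chars.length - i
decreasing_by omega

theorem bd_spec (chars : List Char) : ∀ (n i : Nat), chars.length - i = n →
    (∀ b : Nat, bestDig chars i = some b →
      i ≤ b ∧ b < chars.length ∧ (chars.getD b ' ').isDigit = true ∧
      (∀ k : Nat, i ≤ k → k < chars.length → (chars.getD k ' ').isDigit = true →
        chars.getD k ' ' ≤ chars.getD b ' ') ∧
      (∀ k : Nat, b < k → k < chars.length → (chars.getD k ' ').isDigit = true →
        chars.getD k ' ' < chars.getD b ' ')) ∧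
    (bestDig chars i = none →
      ∀ k : Nat, i ≤ k → k < chars.length → (chars.getD k ' ').isDigit ≠ true) := by
  intro n
  induction n with
  | zero =>
      intro i h0
      rw [bestDig, dif_neg (by omega)]
      constructor
      · intro b hb; simp at hb
      · intro _ k hk1 hk2; omega
  | succ n ih =>
      intro i h0
      have hi : i < chars.length := by omega
      obtain ⟨ihs, ihn⟩ := ih (i + 1) (by omega)
      rw [bestDig, dif_pos hi]
      by_cases hdi : (chars.getD i ' ').isDigit = true
      · cases hb : bestDig chars (i + 1) with
        | none =>
            rw [if_pos (by simp only [hdi]; rfl)]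
            constructor
            · rintro b hsome
              injection hsome with hsome
              subst hsome
              refine ⟨le_refl _, hi, hdi, ?_, ?_⟩
              · intro k hk1 hk2 hk3
                rcases Nat.eq_or_lt_of_le hk1 with h | h
                · subst h; exact le_refl _
                · exact absurd hk3 (ihn hb k (by omega) hk2)
              · intro k hk1 hk2 hk3
                exact absurd hk3 (ihn hb k (by omega) hk2)
            · rintro hnone; simp at hnone
        | some k0 =>
            obtain ⟨hk01, hk02, hk03, hk04, hk05⟩ := ihs k0 hb
            by_cases hcmp : chars.getD i ' ' > chars.getD k0 ' '
            · rw [if_pos (by simp only [hdi, Bool.true_and]; exact decide_eq_true hcmp)]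
              constructor
              · rintro b hsome
                injection hsome with hsome
                subst hsome
                refine ⟨le_refl _, hi, hdi, ?_, ?_⟩
                · intro k hk1 hk2 hk3
                  rcases Nat.eq_or_lt_of_le hk1 with h | h
                  · subst h; exact le_refl _
                  · exact le_of_lt (lt_of_le_of_lt (hk04 k (by omega) hk2 hk3) hcmp)
                · intro k hk1 hk2 hk3
                  exact lt_of_le_of_lt (hk04 k (by omega) hk2 hk3) hcmp
              · rintro hnone; simp at hnone
            · rw [if_neg (by simp only [Bool.and_eq_true, decide_eq_true_iff]; exact fun h => hcmp h.2)]
              constructor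
              · rintro b hsome
                injection hsome with hsome
                subst hsome
                refine ⟨by omega, hk02, hk03, ?_, hk05⟩
                intro k hk1 hk2 hk3
                rcases Nat.eq_or_lt_of_le hk1 with h | h
                · subst h; exact not_lt.mp hcmp
                · exact hk04 k (by omega) hk2 hk3
              · rintro hnone; cases hnone
      · rw [if_neg (by simp only [Bool.and_eq_true]; exact fun h => hdi h.1)]
        constructor
        · rintro b hsome
          obtain ⟨h1, h2, h3, h4, h5⟩ := ihs b hsome
          refine ⟨by omega, h2, h3, ?_, h5⟩
          intro k hk1 hk2 hk3
          rcases Nat.eq_or_lt_of_le hk1 with h | h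
          · subst h; exact absurd hk3 hdi
          · exact h4 k (by omega) hk2 hk3
        · rintro hnone k hk1 hk2
          rcases Nat.eq_or_lt_of_le hk1 with h | h
          · subst h; exact hdi
          · exact ihn hnone k (by omega) hk2

theorem bestDig_len (chars : List Char) : bestDig chars chars.length = none := by
  rw [bestDig, dif_neg (by omega)]

-- a swap fires at position i: a strictly larger digit occurs somewhere to the right
def FireAt (chars : List Char) (i : Nat) : Prop :=
  ∃ j : Nat, i < j ∧ j < chars.length ∧ (chars.getD j ' ').isDigit = true ∧
    chars.getD i ' ' < chars.getD j ' '

theorem pre_fire (s : String) (hpre : Pre_largestSwap s) :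
    (∀ k : Nat, k < s.toList.length → (s.toList.getD k ' ').isDigit = true) ∨
    (∃ i : Nat, (∀ k : Nat, k ≤ i → (s.toList.getD k ' ').isDigit = true) ∧ FireAt s.toList i) := by
  rcases hpre with h | ⟨i, _, j, hj, hpref, hij, hjd, hlt⟩
  · exact Or.inl h
  · exact Or.inr ⟨i, hpref, ⟨j, hij, hj, hjd, hlt⟩⟩

-- the common shape of both programs
def specGo (chars : List Char) (i : Nat) : String :=
  if _h : i < chars.length then
    match bestDig chars (i + 1) with
    | some j =>
        if (chars.getD i ' ').isDigit && decide (chars.getD j ' ' > chars.getD i ' ') then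
          String.ofList ((chars.set i (chars.getD j ' ')).set j (chars.getD i ' '))
        else specGo chars (i + 1)
    | none => specGo chars (i + 1)
  else String.ofList chars
termination_by chars.length - i
decreasing_by omega

theorem build_eq (chars : List Char) : ∀ (i : Nat) (acc : List (Option Nat)), i ≤ chars.length →
    lsBuildB chars i (bestDig chars i) acc
      = (List.range i).map (fun k => bestDig chars (k + 1)) ++ acc := by
  intro i
  induction i with
  | zero => intro acc _; simp [lsBuildB]
  | succ i ih =>
      intro acc hlen
      have hbf : (if (chars.getD i ' ').isDigit &&
            (match bestDig chars (i + 1) with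
             | none => true
             | some b => decide (chars.getD i ' ' > chars.getD b ' '))
          then some i else bestDig chars (i + 1)) = bestDig chars i := by
        conv_rhs => rw [bestDig]
        rw [dif_pos (by omega)]
      rw [lsBuildB.eq_def]
      dsimp only
      rw [hbf, ih (bestDig chars (i + 1) :: acc) (by omega)]
      rw [List.range_succ, List.map_append]
      simp

theorem scan_eq (chars : List Char)
    (hpre : (∀ k : Nat, k < chars.length → (chars.getD k ' ').isDigit = true) ∨
      (∃ i : Nat, (∀ k : Nat, k ≤ i → (chars.getD k ' ').isDigit = true) ∧ FireAt chars i)) :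
    ∀ (cnt i : Nat), i + cnt = chars.length →
      (∀ k : Nat, k < i → (chars.getD k ' ').isDigit = true) →
      (∀ i' : Nat, i' < i → ¬ FireAt chars i') →
      lsScanB chars ((List.range' i cnt).map (fun k => bestDig chars (k + 1))) i
        = specGo chars i := by
  intro cnt
  induction cnt with
  | zero =>
      intro i hlen _ _
      rw [specGo, dif_neg (by omega)]
      simp [lsScanB]
  | succ cnt ih =>
      intro i hlen hdig hnof
      have hi : i < chars.length := by omega
      by_cases hdi : (chars.getD i ' ').isDigit = true
      · obtain ⟨hbs, hbn⟩ := bd_spec chars (chars.length - (i + 1)) (i + 1) rfl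
        rw [List.range'_succ, List.map_cons, specGo, dif_pos hi]
        cases hb : bestDig chars (i + 1) with
        | none =>
            rw [lsScanB]
            dsimp only
            have hnofi : ¬ FireAt chars i := by
              rintro ⟨j, hij, hjlen, hjd, _⟩
              exact hbn hb j (by omega) hjlen hjd
            exact ih (i + 1) (by omega)
              (fun k hk => by rcases Nat.lt_succ_iff_lt_or_eq.mp hk with h | h
                              · exact hdig k h
                              · subst h; exact hdi)
              (fun i' hi' => by rcases Nat.lt_succ_iff_lt_or_eq.mp hi' with h | h
                                · exact hnof i' h
                                · subst h; exact hnofi)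
        | some j =>
            obtain ⟨hj1, hj2, hj3, hj4, hj5⟩ := hbs j hb
            rw [lsScanB]
            dsimp only
            rw [digit_ofStr _ hdi, digit_ofStr _ hj3]
            simp only [Option.getD_some]
            have hiff : (((chars.getD j ' ').toNat : Int) - 48 > ((chars.getD i ' ').toNat : Int) - 48)
                ↔ chars.getD i ' ' < chars.getD j ' ' := by
              rw [char_lt_iff]; omega
            by_cases hgt : chars.getD j ' ' > chars.getD i ' '
            · rw [if_pos (hiff.mpr hgt),
                if_pos (by simp only [hdi, Bool.true_and]; exact decide_eq_true hgt)]
            · rw [if_neg (fun h => hgt (hiff.mp h)),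
                if_neg (by simp only [Bool.and_eq_true, decide_eq_true_iff]
                           exact fun h => hgt h.2)]
              have hnofi : ¬ FireAt chars i := by
                rintro ⟨j', hij', hjlen', hjd', hjgt'⟩
                exact hgt (lt_of_lt_of_le hjgt' (hj4 j' (by omega) hjlen' hjd'))
              exact ih (i + 1) (by omega)
                (fun k hk => by rcases Nat.lt_succ_iff_lt_or_eq.mp hk with h | h
                                · exact hdig k h
                                · subst h; exact hdi)
                (fun i' hi' => by rcases Nat.lt_succ_iff_lt_or_eq.mp hi' with h | h
                                  · exact hnof i' h
                                  · subst h; exact hnofi)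
      · -- chars[i] is not a digit: impossible under the precondition and the scan invariants
        exfalso
        rcases hpre with hall | ⟨i0, hpref, hfire⟩
        · exact hdi (hall i hi)
        · rcases Nat.lt_or_ge i0 i with h | h
          · exact hnof i0 h hfire
          · exact hdi (hpref i h)

theorem alt_eq_specGo (s : String) (hpre : Pre_largestSwap s) :
    largestSwap_alt s = specGo s.toList 0 := by
  unfold largestSwap_alt
  dsimp only
  rw [show (none : Option Nat) = bestDig s.toList s.toList.length from (bestDig_len s.toList).symm,
    build_eq s.toList s.toList.length [] le_rfl, List.append_nil, List.range_eq_range']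
  exact scan_eq s.toList (pre_fire s hpre) s.toList.length 0 (by omega)
    (fun k hk => by omega) (fun i' hi' => by omega)

-- under hl, l.getD c 0 is the last index of c
theorem lastIdx_eq (chars : List Char) (l : PySem.Dict Char Int)
    (hl : ∀ c, l.get? c = lastIdxFrom chars 0 c) (c : Char) (k0 : Nat)
    (hk0 : k0 < chars.length) (hc : chars.getD k0 ' ' = c)
    (hmax : ∀ k' : Nat, k0 < k' → k' < chars.length → chars.getD k' ' ' ≠ c) :
    l.getD c 0 = (k0 : Int) := by
  cases hx : lastIdxFrom chars 0 c with
  | none => exact absurd hc (lif_none chars 0 c hx k0 hk0)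
  | some j =>
      obtain ⟨k, hk1, hk2, hk3, hk4⟩ := lif_some chars 0 j c hx
      have hkk : k = k0 := by
        rcases Nat.lt_trichotomy k k0 with h | h | h
        · exact absurd hc (hk4 k0 h hk0)
        · exact h
        · exact absurd hk3 (hmax k h hk2)
      rw [PySem.Dict.getD_eq_get?_getD, hl, hx]
      simp [hk1, hkk]

theorem cond_iff (chars : List Char) (l : PySem.Dict Char Int)
    (hl : ∀ c, l.get? c = lastIdxFrom chars 0 c) (i : Nat) (c : Char) :
    (l.contains c = true ∧ l.getD c 0 > (i : Int)) ↔
      ∃ j : Nat, i < j ∧ j < chars.length ∧ chars.getD j ' ' = c := by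
  constructor
  · rintro ⟨hcon, hgt⟩
    rw [PySem.Dict.contains_eq_isSome_get?, hl] at hcon
    cases hx : lastIdxFrom chars 0 c with
    | none => rw [hx] at hcon; simp at hcon
    | some j =>
        obtain ⟨k, hk1, hk2, hk3, _⟩ := lif_some chars 0 j c hx
        rw [PySem.Dict.getD_eq_get?_getD, hl, hx] at hgt
        refine ⟨k, ?_, hk2, hk3⟩
        simp only [Option.getD_some] at hgt
        omega
  · rintro ⟨j, hij, hjlen, hjc⟩
    cases hx : lastIdxFrom chars 0 c with
    | none => exact absurd hjc (lif_none chars 0 c hx j hjlen)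
    | some j0 =>
        obtain ⟨k, hk1, hk2, hk3, hk4⟩ := lif_some chars 0 j0 c hx
        have hjk : j ≤ k := by
          by_contra hlt
          exact hk4 j (by omega) hjlen hjc
        constructor
        · rw [PySem.Dict.contains_eq_isSome_get?, hl, hx]; rfl
        · rw [PySem.Dict.getD_eq_get?_getD, hl, hx]
          simp only [Option.getD_some]
          omega

theorem inner_none (chars : List Char) (l : PySem.Dict Char Int)
    (hl : ∀ c, l.get? c = lastIdxFrom chars 0 c) (i : Nat) :
    ∀ ds : List Int,
      (∀ d ∈ ds, ¬ ∃ j : Nat, i < j ∧ j < chars.length ∧ chars.getD j ' ' = Char.ofNat (d.toNat + 48)) →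
      lsInnerA l i ds = none := by
  intro ds
  induction ds with
  | nil => intro _; rfl
  | cons d ds ih =>
      intro h
      rw [lsInnerA]
      rw [if_neg]
      · exact ih (fun d' hd' => h d' (List.mem_cons_of_mem d hd'))
      · rw [cond_iff chars l hl]
        exact h d List.mem_cons_self

theorem inner_some (chars : List Char) (l : PySem.Dict Char Int)
    (hl : ∀ c, l.get? c = lastIdxFrom chars 0 c) (i : Nat) (m : Int)
    (hQ : ∃ j : Nat, i < j ∧ j < chars.length ∧ chars.getD j ' ' = Char.ofNat (m.toNat + 48)) :
    ∀ (n : Nat) (a : Int), (a - m).toNat = n → m ≤ a →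
      (∀ d : Int, m < d → d ≤ a →
        ¬ ∃ j : Nat, i < j ∧ j < chars.length ∧ chars.getD j ' ' = Char.ofNat (d.toNat + 48)) →
      ∀ v : Int, v < m → lsInnerA l i (PySem.List.pyRange a v (-1)) = some (Char.ofNat (m.toNat + 48)) := by
  intro n
  induction n with
  | zero =>
      intro a h0 hma _ v hvm
      have ham : a = m := by omega
      subst ham
      rw [PySem.List.pyRange_neg_one_cons (by omega), lsInnerA, if_pos]
      rw [cond_iff chars l hl]
      exact hQ
  | succ n ih =>
      intro a h0 hma hno v hvm
      have hlt : m < a := by omega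
      rw [PySem.List.pyRange_neg_one_cons (by omega), lsInnerA, if_neg]
      · exact ih (a - 1) (by omega) (by omega)
          (fun d h1 h2 => hno d h1 (by omega)) v hvm
      · rw [cond_iff chars l hl]
        exact hno a hlt le_rfl

theorem loopA_eq (chars : List Char) (l : PySem.Dict Char Int)
    (hl : ∀ c, l.get? c = lastIdxFrom chars 0 c)
    (hpre : (∀ k : Nat, k < chars.length → (chars.getD k ' ').isDigit = true) ∨
      (∃ i : Nat, (∀ k : Nat, k ≤ i → (chars.getD k ' ').isDigit = true) ∧ FireAt chars i)) :
    ∀ (n i : Nat), chars.length - i = n →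
      (∀ k : Nat, k < i → (chars.getD k ' ').isDigit = true) →
      (∀ i' : Nat, i' < i → ¬ FireAt chars i') →
      lsLoopA chars l i = specGo chars i := by
  intro n
  induction n with
  | zero =>
      intro i h0 _ _
      rw [lsLoopA, dif_neg (by omega), specGo, dif_neg (by omega)]
  | succ n ih =>
      intro i h0 hdig hnof
      have hi : i < chars.length := by omega
      by_cases hdi : (chars.getD i ' ').isDigit = true
      · have hvi := digit_toNat _ hdi
        rw [lsLoopA, dif_pos hi, digit_ofStr _ hdi]
        simp only [Option.getD_some]
        obtain ⟨hbs, hbn⟩ := bd_spec chars (chars.length - (i + 1)) (i + 1) rfl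
        cases hb : bestDig chars (i + 1) with
        | some b =>
            obtain ⟨hb1, hb2, hb3, hb4, hb5⟩ := hbs b hb
            by_cases hgt : chars.getD b ' ' > chars.getD i ' '
            · -- a strictly larger digit exists after i: the inner loop finds its character
              have hgtn : (chars.getD i ' ').toNat < (chars.getD b ' ').toNat :=
                (char_lt_iff _ _).mp hgt
              have hvb := digit_toNat _ hb3
              set cb := chars.getD b ' ' with hcbdef
              set m : Int := (cb.toNat : Int) - 48 with hmdef
              have hmtn : m.toNat + 48 = cb.toNat := by omega
              have hmc : Char.ofNat (m.toNat + 48) = cb := by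
                rw [hmtn]; exact Char.ofNat_toNat cb
              have hQ : ∃ j : Nat, i < j ∧ j < chars.length ∧
                  chars.getD j ' ' = Char.ofNat (m.toNat + 48) :=
                ⟨b, by omega, hb2, by rw [hmc]⟩
              have hno : ∀ d : Int, m < d → d ≤ 9 →
                  ¬ ∃ j : Nat, i < j ∧ j < chars.length ∧
                    chars.getD j ' ' = Char.ofNat (d.toNat + 48) := by
                rintro d hd1 hd2 ⟨j, hij, hjlen, hjc⟩
                have hdn : (Char.ofNat (d.toNat + 48)).toNat = d.toNat + 48 :=
                  dchar_toNat d.toNat (by omega)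
                have hjd : (chars.getD j ' ').isDigit = true := by
                  rw [hjc]; exact dchar_isDigit d.toNat (by omega)
                have hle : chars.getD j ' ' ≤ cb := hb4 j (by omega) hjlen hjd
                rw [char_le_iff] at hle
                rw [hjc, hdn] at hle
                omega
              rw [inner_some chars l hl i m hQ (9 - m).toNat 9 rfl (by omega) hno _ (by omega)]
              dsimp only
              have hgd : l.getD (Char.ofNat (m.toNat + 48)) 0 = ((b : Nat) : Int) := by
                rw [hmc]
                refine lastIdx_eq chars l hl cb b hb2 rfl ?_
                intro k' hk1 hk2 hk3
                have : (chars.getD k' ' ').isDigit = true := by rw [hk3]; exact hb3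
                exact absurd hk3 (ne_of_lt (hb5 k' hk1 hk2 this))
              rw [hgd]
              conv_rhs => rw [specGo]
              rw [dif_pos hi, hb]
              dsimp only
              rw [if_pos (show ((chars.getD i ' ').isDigit &&
                    decide (cb > chars.getD i ' ')) = true by
                  simp only [hdi, Bool.true_and, decide_eq_true_iff]; exact hgt)]
              simp
            · -- largest later digit does not beat chars[i]: the inner loop falls through
              rw [inner_none chars l hl i _ ?noneA]
              case noneA =>
                rintro d hdmem ⟨j, hij, hjlen, hjc⟩
                rw [PySem.List.mem_pyRange_neg_one] at hdmem
                have hdn : (Char.ofNat (d.toNat + 48)).toNat = d.toNat + 48 :=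
                  dchar_toNat d.toNat (by omega)
                have hjd : (chars.getD j ' ').isDigit = true := by
                  rw [hjc]; exact dchar_isDigit d.toNat (by omega)
                have hle : chars.getD j ' ' ≤ chars.getD b ' ' := hb4 j (by omega) hjlen hjd
                replace hgt := not_lt.mp hgt
                rw [char_le_iff] at hle hgt
                rw [hjc, hdn] at hle
                omega
              dsimp only
              have hnofi : ¬ FireAt chars i := by
                rintro ⟨j, hij, hjlen, hjd, hjgt⟩
                have : chars.getD j ' ' ≤ chars.getD b ' ' := hb4 j (by omega) hjlen hjd
                exact hgt (lt_of_lt_of_le hjgt this)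
              rw [ih (i + 1) (by omega)
                (fun k hk => by rcases Nat.lt_succ_iff_lt_or_eq.mp hk with h | h
                                · exact hdig k h
                                · subst h; exact hdi)
                (fun i' hi' => by rcases Nat.lt_succ_iff_lt_or_eq.mp hi' with h | h
                                  · exact hnof i' h
                                  · subst h; exact hnofi)]
              conv_rhs => rw [specGo]
              rw [dif_pos hi, hb]
              dsimp only
              rw [if_neg (show ¬ ((chars.getD i ' ').isDigit &&
                    decide (chars.getD b ' ' > chars.getD i ' ')) = true by
                  simp only [Bool.and_eq_true, decide_eq_true_iff]
                  exact fun h => hgt h.2)]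
        | none =>
            -- no digit at all after i
            rw [inner_none chars l hl i _ ?noneB]
            case noneB =>
              rintro d hdmem ⟨j, hij, hjlen, hjc⟩
              rw [PySem.List.mem_pyRange_neg_one] at hdmem
              have hjd : (chars.getD j ' ').isDigit = true := by
                rw [hjc]; exact dchar_isDigit d.toNat (by omega)
              exact hbn hb j (by omega) hjlen hjd
            dsimp only
            have hnofi : ¬ FireAt chars i := by
              rintro ⟨j, hij, hjlen, hjd, _⟩
              exact hbn hb j (by omega) hjlen hjd
            rw [ih (i + 1) (by omega)
              (fun k hk => by rcases Nat.lt_succ_iff_lt_or_eq.mp hk with h | h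
                              · exact hdig k h
                              · subst h; exact hdi)
              (fun i' hi' => by rcases Nat.lt_succ_iff_lt_or_eq.mp hi' with h | h
                                · exact hnof i' h
                                · subst h; exact hnofi)]
            conv_rhs => rw [specGo]
            rw [dif_pos hi, hb]
      · -- chars[i] is not a digit: impossible under the precondition and the loop invariants
        exfalso
        rcases hpre with hall | ⟨i0, hpref, hfire⟩
        · exact hdi (hall i hi)
        · rcases Nat.lt_or_ge i0 i with h | h
          · exact hnof i0 h hfire
          · exact hdi (hpref i h)

theorem a_eq_specGo (s : String) (hpre : Pre_largestSwap s) : largestSwap s = specGo s.toList 0 := by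
  unfold largestSwap
  have hl : ∀ c, ((PySem.List.enumerate s.toList 0).foldl
      (fun d p => d.insert p.2 p.1) PySem.Dict.empty).get? c = lastIdxFrom s.toList 0 c := by
    intro c
    rw [dict_get?_eq s.toList 0 PySem.Dict.empty c]
    simp [PySem.Dict.get?_empty]
  exact loopA_eq s.toList _ hl (pre_fire s hpre) s.toList.length 0 rfl
    (fun k hk => by omega) (fun i' hi' => by omega)

-- ===== VERDICT (by name: the statement is the Claim_ definition above) =====
theorem largestSwap_spec : Claim_equal_largestSwap := by
  intro s _ hpre
  unfold Spec_largestSwap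
  rw [a_eq_specGo s hpre, alt_eq_specGo s hpre]
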